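-- pv_equiv track=rewrite | github.com/anguswg-ucsb/ingredient-slicer | ingredient_slicer/_utils.py | _find_substring_indices
-- ===== SOURCE A (Python) =====
-- def _find_substring_indices(text: str, substring: str) -> list:
--
--     """Find the start and end indices of a substring in a string
--     Case insensitive, and will return all instances of the substring in the text string
--     Args:
--         text (str): The text to search for the substring
--         substring (str): The substring to search for in the text
--     Returns:
--         list: A list of lists containing the start and end indices of the substring
--     """
--
--     text = text.lower()
--     substring = substring.lower()
--
--     substring_length = len(substring)
--
--     L = 0
--     substring_indices = []
--
--     for R in range(0, len(text)):
--         if R - L == substring_length: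
--             if text[L:R] == substring:
--                 substring_indices.append([L, R])
--             L += 1
--
--     return substring_indices
-- ===== SOURCE B (Python) =====
-- def _find_substring_indices(text: str, substring: str) -> list:
--     """Find all [start, end) index pairs of substring in text, case-insensitive,
--     using str.find to jump between matches instead of sliding a window."""
--     t = text.lower()
--     s = substring.lower()
--     m = len(s)
--     out = []
--     i = t.find(s)
--     while i != -1:
--         out.append([i, i + m])
--         i = t.find(s, i + 1)
--     return out
-- ===== Notes on version B (the rewrite author's own statement) =====
-- stated objective: faster
-- what changed: Replaced A's character-by-character sliding window (which slices and compares the substring at every position) with a str.find loop that jumps from match to match at C speed; B also reports the match that ends exactly at the end of the text, which A's off-by-one loop bound misses.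
-- intended difference: When the lower-cased text ends with the lower-cased substring (including an empty substring), A's loop stops one position early and omits the final match [len(t)-len(s), len(t)], while B includes it; reporting all matches is the function's stated purpose, so B's value is intended. — e.g. on _find_substring_indices("aA", "a"): A returns [[0, 1]], B returns [[0, 1], [1, 2]]
import Mathlib
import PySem

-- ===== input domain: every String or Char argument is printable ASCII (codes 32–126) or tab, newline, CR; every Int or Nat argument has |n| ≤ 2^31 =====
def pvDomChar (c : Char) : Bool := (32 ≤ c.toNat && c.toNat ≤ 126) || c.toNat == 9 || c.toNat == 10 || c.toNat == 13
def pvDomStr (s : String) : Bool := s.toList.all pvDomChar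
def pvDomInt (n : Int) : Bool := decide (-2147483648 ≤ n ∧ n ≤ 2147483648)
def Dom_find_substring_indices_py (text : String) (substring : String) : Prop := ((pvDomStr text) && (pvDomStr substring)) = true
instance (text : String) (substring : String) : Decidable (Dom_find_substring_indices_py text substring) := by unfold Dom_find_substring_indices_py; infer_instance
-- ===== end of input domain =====

-- B replaces A's per-position slide-and-slice window with a str.find jump loop; B also reports
-- the match ending exactly at the end of the text, which A's loop bound misses (see D_ below).

-- ===== PORT A =====
-- strings are handled on their code-point lists (PySem.Chars: exact)
def find_substring_indices_py (text : String) (substring : String) : List (List Int) :=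
  let t := PySem.Chars.lower text.toList          -- text = text.lower()
  let s := PySem.Chars.lower substring.toList     -- substring = substring.lower()
  let m : Int := PySem.Chars.len s                -- substring_length = len(substring)
  -- L = 0; substring_indices = []; for R in range(0, len(text)): ...
  ((PySem.List.pyRange 0 (PySem.Chars.len t)).foldl
    (fun (st : Int × List (List Int)) R =>
      if R - st.1 = m then
        (st.1 + 1,
         if PySem.List.slice t (some st.1) (some R) = s then st.2 ++ [[st.1, R]] else st.2)
      else st)
    (0, [])).2

-- ===== PORT B =====
-- while i != -1: out.append([i, i + m]); i = t.find(s, i + 1)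
-- fuel (len(t) + 2) only totalizes the loop: each found index strictly increases and is ≤ len(t)
def pvAltGo (t s : List Char) (m : Int) (fuel : Nat) (i : Int) : List (List Int) :=
  match fuel with
  | 0 => []
  | f + 1 =>
    if i = -1 then []
    else [i, i + m] :: pvAltGo t s m f (PySem.Chars.findFrom t s (i + 1))

def find_substring_indices_py_alt (text : String) (substring : String) : List (List Int) :=
  let t := PySem.Chars.lower text.toList          -- t = text.lower()
  let s := PySem.Chars.lower substring.toList     -- s = substring.lower()
  let m : Int := PySem.Chars.len s                -- m = len(s)
  pvAltGo t s m (t.length + 2) (PySem.Chars.find t s)   -- i = t.find(s); while loop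

-- ===== PRECONDITION & SPEC =====
-- When the lower-cased text ends with the lower-cased substring (including an empty substring),
-- A's loop stops one position early and omits the final match [len(t)-len(s), len(t)], while B
-- includes it; reporting all matches is the function's stated purpose, so B's value is intended.
def D_find_substring_indices_py (text : String) (substring : String) : Prop :=
  PySem.Chars.endswith (PySem.Chars.lower text.toList) (PySem.Chars.lower substring.toList) = true
instance (text : String) (substring : String) : Decidable (D_find_substring_indices_py text substring) := by
  unfold D_find_substring_indices_py; infer_instance

def Spec_find_substring_indices_py (text : String) (substring : String) (out : List (List Int)) : Prop :=
  ¬ D_find_substring_indices_py text substring → out = find_substring_indices_py_alt text substring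
instance (text : String) (substring : String) (out : List (List Int)) : Decidable (Spec_find_substring_indices_py text substring out) := by
  unfold Spec_find_substring_indices_py; infer_instance

def pvDiffWitness_find_substring_indices_py : String × String := ("aA", "a")
def pvDiffWitnessOut_find_substring_indices_py : (List (List Int)) × (List (List Int)) :=
  ([[0, 1]], [[0, 1], [1, 2]])

-- ===== CLAIM (what is proved, stated in full; the proofs are below) =====
def Claim_unchanged_find_substring_indices_py : Prop := ∀ (text : String) (substring : String), Dom_find_substring_indices_py text substring → Spec_find_substring_indices_py text substring (find_substring_indices_py text substring)
def Claim_changed_find_substring_indices_py : Prop := Dom_find_substring_indices_py (pvDiffWitness_find_substring_indices_py.1) (pvDiffWitness_find_substring_indices_py.2) ∧ D_find_substring_indices_py (pvDiffWitness_find_substring_indices_py.1) (pvDiffWitness_find_substring_indices_py.2) ∧ find_substring_indices_py (pvDiffWitness_find_substring_indices_py.1) (pvDiffWitness_find_substring_indices_py.2) = pvDiffWitnessOut_find_substring_indices_py.1 ∧ find_substring_indices_py_alt (pvDiffWitness_find_substring_indices_py.1) (pvDiffWitness_find_substring_indices_py.2) = pvDiffWitnessOut_find_substring_indices_py.2 ∧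 pvDiffWitnessOut_find_substring_indices_py.1 ≠ pvDiffWitnessOut_find_substring_indices_py.2
def Claim_exact_find_substring_indices_py : Prop := ∀ (text : String) (substring : String), Dom_find_substring_indices_py text substring → D_find_substring_indices_py text substring → find_substring_indices_py text substring ≠ find_substring_indices_py_alt text substring

-- ===== LEMMAS AND PROOFS =====

-- the matches with start index < r, as [start, start + len(s)] pairs
def pvMatches (t s : List Char) (r : Nat) : List (List Int) :=
  ((List.range r).filter (fun i => decide (s <+: t.drop i))).map
    (fun (i : Nat) => ([(i : Int), (i : Int) + (s.length : Int)] : List Int))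

-- the matches with start index ≥ k (among 0..t.length)
def pvMatchesFrom (t s : List Char) (k : Nat) : List (List Int) :=
  ((List.range (t.length + 1)).filter (fun i => decide (s <+: t.drop i) && decide (k ≤ i))).map
    (fun (i : Nat) => ([(i : Int), (i : Int) + (s.length : Int)] : List Int))

-- CPython quirk (kept by PySem): find with a start past len(t) is -1
lemma pvFindFrom_past (t sub : List Char) (k : Nat) (h : t.length < k) :
    PySem.Chars.findFrom t sub (k : Int) = -1 := by
  simp only [PySem.Chars.findFrom]
  split
  · exfalso; omega
  · split
    · rfl
    · exfalso; omega

lemma pvFind_nil (l : List Char) : PySem.Chars.find l [] = 0 := by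
  cases l <;> simp [PySem.Chars.find, PySem.Chars.find.go]

-- loop invariant of A: after the prefix of rounds R < r, L = r - m and the output
-- holds exactly the matches with start index < r - m
lemma pvA_inv (t s : List Char) (r : Nat) :
    (((List.range r).map (fun (k : Nat) => (k : Int))).foldl
      (fun (st : Int × List (List Int)) R =>
        if R - st.1 = (s.length : Int) then
          (st.1 + 1,
           if PySem.List.slice t (some st.1) (some R) = s then st.2 ++ [[st.1, R]] else st.2)
        else st)
      (0, [])) = (((r - s.length : Nat) : Int), pvMatches t s (r - s.length)) := by
  induction r with
  | zero => simp [pvMatches]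
  | succ r ih =>
    rw [List.range_succ, List.map_append, List.foldl_append, ih]
    simp only [List.map_cons, List.map_nil, List.foldl_cons, List.foldl_nil]
    by_cases hm : s.length ≤ r
    · have hc : (r : Int) - ((r - s.length : Nat) : Int) = (s.length : Int) := by
        omega
      rw [if_pos hc]
      have hr1 : r + 1 - s.length = (r - s.length) + 1 := by omega
      have hsl : PySem.List.slice t (some ((r - s.length : Nat) : Int)) (some (r : Int)) =
          List.take s.length (List.drop (r - s.length) t) := by
        rw [PySem.List.slice_natCast]
        congr 1
        omega
      rw [Prod.mk.injEq]
      refine ⟨?_, ?_⟩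
      · omega
      · rw [hr1]
        simp only [pvMatches, List.range_succ, List.filter_append, List.map_append]
        by_cases hp : s <+: List.drop (r - s.length) t
        · have : List.take s.length (List.drop (r - s.length) t) = s :=
            (List.prefix_iff_eq_take.1 hp).symm
          rw [hsl, if_pos this]
          simp [hp]
          omega
        · have : ¬ (List.take s.length (List.drop (r - s.length) t) = s) := by
            intro h
            exact hp (List.prefix_iff_eq_take.2 h.symm)
          rw [hsl, if_neg this]
          simp [hp]
    · have hc : ¬ ((r : Int) - ((r - s.length : Nat) : Int) = (s.length : Int)) := by
        omega
      rw [if_neg hc]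
      have : r + 1 - s.length = r - s.length := by omega
      rw [this]

lemma pvA_char (text substring : String) :
    find_substring_indices_py text substring =
      pvMatches (PySem.Chars.lower text.toList) (PySem.Chars.lower substring.toList)
        ((PySem.Chars.lower text.toList).length - (PySem.Chars.lower substring.toList).length) := by
  simp only [find_substring_indices_py, PySem.Chars.len_eq, PySem.List.pyRange_zero_natCast]
  exact congrArg Prod.snd (pvA_inv (PySem.Chars.lower text.toList)
    (PySem.Chars.lower substring.toList) ((PySem.Chars.lower text.toList).length))

-- a prefix match at or beyond k is an infix of t.drop k
lemma pvNoMatch {t s : List Char} {k i : Nat} (hk : k ≤ i) (h : s <+: t.drop i) :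
    s <:+: t.drop k := by
  have h2 : t.drop i = (t.drop k).drop (i - k) := by rw [List.drop_drop]; congr 1; omega
  rw [h2] at h
  exact h.isInfix.trans (List.drop_suffix _ _).isInfix

-- one found position j splits the remaining matches as j :: (matches from j + 1)
lemma pvStep (t s : List Char) (k j : Nat) (hkj : k ≤ j) (hjn : j ≤ t.length)
    (hpj : s <+: t.drop j) (hmin : ∀ i, k ≤ i → i < j → ¬ s <+: t.drop i) :
    pvMatchesFrom t s k = [(j : Int), (j : Int) + (s.length : Int)] :: pvMatchesFrom t s (j + 1) := by
  have hsplit : List.range (t.length + 1) =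
      List.range (j + 1) ++ (List.range (t.length - j)).map ((j + 1) + ·) := by
    rw [← List.range_add]; congr 1; omega
  have hnil1 : (List.range j).filter (fun i => decide (s <+: t.drop i) && decide (k ≤ i)) = [] := by
    rw [List.filter_eq_nil_iff]
    intro i hi
    simp only [List.mem_range] at hi
    by_cases hki : k ≤ i
    · simp [hmin i hki hi, hki]
    · simp [hki]
  have hnil2 : (List.range j).filter
      (fun i => decide (s <+: t.drop i) && decide (j + 1 ≤ i)) = [] := by
    rw [List.filter_eq_nil_iff]
    intro i hi
    simp only [List.mem_range] at hi
    have : ¬ (j + 1 ≤ i) := by omega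
    simp [this]
  have hnil3 : List.filter (fun i => decide (s <+: t.drop i) && decide (j + 1 ≤ i)) [j] = [] := by
    simp
  have hone : List.filter (fun i => decide (s <+: t.drop i) && decide (k ≤ i)) [j] = [j] := by
    simp [hpj, hkj]
  have htail : ∀ a ∈ (List.range (t.length - j)).map ((j + 1) + ·),
      (decide (s <+: t.drop a) && decide (k ≤ a)) = (decide (s <+: t.drop a) && decide (j + 1 ≤ a)) := by
    intro a ha
    simp only [List.mem_map, List.mem_range] at ha
    obtain ⟨x, _, rfl⟩ := ha
    have h1 : k ≤ j + 1 + x := by omega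
    have h2 : j + 1 ≤ j + 1 + x := by omega
    simp [h1, h2]
  unfold pvMatchesFrom
  rw [hsplit, List.range_succ]
  simp only [List.filter_append, hnil1, hnil2, hnil3, hone, List.nil_append, List.append_nil,
    List.map_append, List.filter_congr htail]
  simp

lemma pvEmpty_of_lt (t s : List Char) (k : Nat) (hk : t.length < k) :
    pvMatchesFrom t s k = [] := by
  unfold pvMatchesFrom
  have : (List.range (t.length + 1)).filter
      (fun i => decide (s <+: t.drop i) && decide (k ≤ i)) = [] := by
    rw [List.filter_eq_nil_iff]
    intro i hi
    simp only [List.mem_range] at hi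
    have : ¬ (k ≤ i) := by omega
    simp [this]
  rw [this]; rfl

lemma pvEmpty_of_noinfix (t s : List Char) (k : Nat) (h : ¬ s <:+: t.drop k) :
    pvMatchesFrom t s k = [] := by
  unfold pvMatchesFrom
  have : (List.range (t.length + 1)).filter
      (fun i => decide (s <+: t.drop i) && decide (k ≤ i)) = [] := by
    rw [List.filter_eq_nil_iff]
    intro i hi
    by_cases hki : k ≤ i
    · by_cases hp : s <+: t.drop i
      · exact absurd (pvNoMatch hki hp) h
      · simp [hp]
    · simp [hki]
  rw [this]; rfl

-- loop invariant of B: the find loop started at k produces exactly the matches with start ≥ k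
lemma pvB_inv (t s : List Char) (fuel : Nat) : ∀ (k : Nat), k ≤ t.length + 1 →
    t.length + 2 - k ≤ fuel →
    pvAltGo t s (PySem.Chars.len s) fuel (PySem.Chars.findFrom t s (k : Int)) =
      pvMatchesFrom t s k := by
  induction fuel with
  | zero => intro k hk hf; omega
  | succ f ih =>
    intro k hk hf
    by_cases hkn : k ≤ t.length
    · by_cases hj : PySem.Chars.findFrom t s (k : Int) = -1
      · rw [hj]
        have hnom : ¬ s <:+: t.drop k := (PySem.Chars.findFrom_natCast_eq_neg_one_iff t s k hkn).1 hj
        rw [pvEmpty_of_noinfix t s k hnom]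
        simp [pvAltGo]
      · obtain ⟨hge, hpre, hmin⟩ := PySem.Chars.findFrom_natCast_spec t s k hkn hj
        have hj0 : (0 : Int) ≤ PySem.Chars.findFrom t s (k : Int) := le_trans (by omega) hge
        have hjeq : PySem.Chars.findFrom t s (k : Int) =
            ((PySem.Chars.findFrom t s (k : Int)).toNat : Int) := (Int.toNat_of_nonneg hj0).symm
        have hjn : (PySem.Chars.findFrom t s (k : Int)).toNat ≤ t.length := by
          by_cases hs : s = []
          · subst hs
            have h2 := PySem.Chars.findFrom_natCast t [] k hkn
            rw [pvFind_nil] at h2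
            simp at h2
            omega
          · have hne : t.drop (PySem.Chars.findFrom t s (k : Int)).toNat ≠ [] := by
              intro hnil
              rw [hnil, List.prefix_nil] at hpre
              exact hs hpre
            rw [ne_eq, List.drop_eq_nil_iff] at hne
            omega
        rw [pvAltGo, if_neg hj]
        have hrec : PySem.Chars.findFrom t s (PySem.Chars.findFrom t s (k : Int) + 1) =
            PySem.Chars.findFrom t s (((PySem.Chars.findFrom t s (k : Int)).toNat + 1 : Nat) : Int) := by
          rw [hjeq]; push_cast; ring_nf; simp
        rw [hrec, ih ((PySem.Chars.findFrom t s (k : Int)).toNat + 1) (by omega) (by omega)]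
        rw [pvStep t s k (PySem.Chars.findFrom t s (k : Int)).toNat (by omega) hjn hpre hmin]
        rw [PySem.Chars.len_eq, hjeq]
        simp
    · have hk1 : t.length < k := by omega
      rw [pvFindFrom_past t s k hk1, pvEmpty_of_lt t s k hk1]
      simp [pvAltGo]

lemma pvMatchesFrom_zero (t s : List Char) :
    pvMatchesFrom t s 0 = pvMatches t s (t.length + 1) := by
  unfold pvMatchesFrom pvMatches
  congr 1
  apply List.filter_congr
  intro a _
  simp

lemma pvB_char (text substring : String) :
    find_substring_indices_py_alt text substring =
      pvMatches (PySem.Chars.lower text.toList) (PySem.Chars.lower substring.toList)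
        ((PySem.Chars.lower text.toList).length + 1) := by
  have h := pvB_inv (PySem.Chars.lower text.toList) (PySem.Chars.lower substring.toList)
    ((PySem.Chars.lower text.toList).length + 2) 0 (by omega) (by omega)
  simp only [Nat.cast_zero, PySem.Chars.findFrom_zero] at h
  simp only [find_substring_indices_py_alt]
  rw [h, pvMatchesFrom_zero]

-- the match at start t.length - s.length exists iff s is a suffix of t
lemma pvPred_suffix (t s : List Char) (hm : s.length ≤ t.length) :
    (s <+: t.drop (t.length - s.length)) ↔ s <:+ t := by
  have hlen : (t.drop (t.length - s.length)).length = s.length := by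
    rw [List.length_drop]; omega
  rw [List.prefix_iff_eq_take, List.take_of_length_le (le_of_eq hlen), List.suffix_iff_eq_drop]

-- B's matches are A's matches plus, exactly when s is a suffix of t, the final match
lemma pvSplit (t s : List Char) :
    pvMatches t s (t.length + 1) =
      pvMatches t s (t.length - s.length) ++
        (if s <:+ t then
          [[((t.length - s.length : Nat) : Int), ((t.length - s.length : Nat) : Int) + (s.length : Int)]]
         else []) := by
  by_cases hm : s.length ≤ t.length
  · have hsplit : List.range (t.length + 1) =
        List.range (t.length - s.length) ++
          (List.range (s.length + 1)).map ((t.length - s.length) + ·) := by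
      rw [← List.range_add]; congr 1; omega
    have htail : ((List.range (s.length + 1)).map ((t.length - s.length) + ·)).filter
        (fun i => decide (s <+: t.drop i)) =
        if s <:+ t then [t.length - s.length] else [] := by
      rw [List.filter_map, List.range_succ_eq_map]
      simp only [Function.comp_def]
      have hrest : (List.map Nat.succ (List.range s.length)).filter
          (fun x => decide (s <+: t.drop ((t.length - s.length) + x))) = [] := by
        rw [List.filter_eq_nil_iff]
        intro x hx
        simp only [List.mem_map, List.mem_range] at hx
        obtain ⟨y, hy, rfl⟩ := hx
        simp only [decide_eq_true_eq]
        intro hp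
        have := hp.length_le
        rw [List.length_drop] at this
        omega
      rw [List.filter_cons, hrest]
      by_cases hs : s <:+ t
      · rw [if_pos hs]
        have : s <+: t.drop (t.length - s.length) := (pvPred_suffix t s hm).2 hs
        simp [this]
      · rw [if_neg hs]
        have : ¬ s <+: t.drop (t.length - s.length) := fun h => hs ((pvPred_suffix t s hm).1 h)
        simp [this]
    unfold pvMatches
    rw [hsplit, List.filter_append, htail, List.map_append]
    congr 1
    by_cases hs : s <:+ t <;> simp [hs]
  · have hnil : (List.range (t.length + 1)).filter (fun i => decide (s <+: t.drop i)) = [] := by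
      rw [List.filter_eq_nil_iff]
      intro i _
      simp only [decide_eq_true_eq]
      intro hp
      have := hp.length_le
      rw [List.length_drop] at this
      omega
    have hs : ¬ s <:+ t := by
      intro h
      exact hm h.length_le
    have h0 : t.length - s.length = 0 := by omega
    unfold pvMatches
    rw [hnil, if_neg hs, h0]
    simp

-- ===== VERDICT (by name: the statement is the Claim_ definition above) =====
theorem find_substring_indices_py_spec : Claim_unchanged_find_substring_indices_py := by
  intro text substring _ hD
  have hsuf : ¬ (PySem.Chars.lower substring.toList <:+ PySem.Chars.lower text.toList) := by
    intro h
    exact hD ((PySem.Chars.endswith_iff _ _).2 h)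
  rw [pvA_char, pvB_char, pvSplit, if_neg hsuf, List.append_nil]

theorem find_substring_indices_py_changed : Claim_changed_find_substring_indices_py := by
  unfold Claim_changed_find_substring_indices_py; decide

theorem find_substring_indices_py_tight : Claim_exact_find_substring_indices_py := by
  intro text substring _ hD heq
  have hsuf : PySem.Chars.lower substring.toList <:+ PySem.Chars.lower text.toList :=
    (PySem.Chars.endswith_iff _ _).1 hD
  rw [pvA_char, pvB_char, pvSplit, if_pos hsuf] at heq
  have := congrArg List.length heq
  simp at this
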